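-- pv_equiv track=rewrite | github.com/Zeeeepa/graph-sitter | src/graph_sitter/adapters/comprehensive_analysis_system.py | cc_rank
-- ===== SOURCE A (Python) =====
-- def cc_rank(complexity: int) -> str:
--     """Rank cyclomatic complexity (from successful PRs)."""
--     if complexity < 0:
--         return "F"
--
--     ranks = [
--         (1, 5, "A"),
--         (6, 10, "B"),
--         (11, 20, "C"),
--         (21, 30, "D"),
--         (31, 40, "E"),
--         (41, float("inf"), "F"),
--     ]
--     for low, high, rank in ranks:
--         if low <= complexity <= high:
--             return rank
--     return "F"
-- ===== SOURCE B (Python) =====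
-- import bisect
--
-- _THRESHOLDS = [1, 6, 11, 21, 31, 41]
-- _LETTERS = ["F", "A", "B", "C", "D", "E", "F"]
--
-- def cc_rank(complexity: int) -> str:
--     """Rank cyclomatic complexity via binary search over the boundary array."""
--     return _LETTERS[bisect.bisect_right(_THRESHOLDS, complexity)]
-- ===== Notes on version B (the rewrite author's own statement) =====
-- stated objective: idiomatic
-- what changed: Replaced the linear scan over (low, high, rank) range tuples with a single bisect_right binary search over a sorted boundary array indexing into a letter table.
import Mathlib
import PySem

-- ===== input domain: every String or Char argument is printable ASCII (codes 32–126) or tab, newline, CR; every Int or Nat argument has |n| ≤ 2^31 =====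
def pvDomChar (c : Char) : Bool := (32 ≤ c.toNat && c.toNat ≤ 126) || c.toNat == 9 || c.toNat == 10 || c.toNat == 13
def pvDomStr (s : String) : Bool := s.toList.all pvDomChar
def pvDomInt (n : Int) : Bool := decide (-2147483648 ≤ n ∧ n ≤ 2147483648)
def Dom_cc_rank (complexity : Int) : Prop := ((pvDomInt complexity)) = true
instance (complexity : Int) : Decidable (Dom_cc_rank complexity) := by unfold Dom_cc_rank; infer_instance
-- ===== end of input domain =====

-- B replaces A's linear scan over (low, high, rank) tuples by binary search over a sorted boundary array (idiomatic bisect_right).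

-- ===== PORT A =====
-- the 'high' of the last A-tuple is float('inf'); ported as 'none' = no upper bound (exact for int comparisons)
def ccRankLoop (complexity : Int) : List (Int × Option Int × String) → String
  | [] => "F"
  | (low, high, rank) :: rest =>
      if low ≤ complexity && (match high with | some h => decide (complexity ≤ h) | none => true) then rank
      else ccRankLoop complexity rest

def cc_rank (complexity : Int) : String :=
  if complexity < 0 then "F"
  else
    ccRankLoop complexity
      [(1, some 5, "A"), (6, some 10, "B"), (11, some 20, "C"),
       (21, some 30, "D"), (31, some 40, "E"), (41, none, "F")]

-- ===== PORT B =====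
-- bisect.bisect_right, transliterated (lo/hi halving loop)
def bisectRightGo (a : List Int) (x : Int) (lo hi : Nat) : Nat :=
  if h : lo < hi then
    let mid := (lo + hi) / 2
    if x < a.getD mid 0 then bisectRightGo a x lo mid else bisectRightGo a x (mid + 1) hi
  else lo
termination_by hi - lo
decreasing_by
  all_goals omega

def ccThresholds : List Int := [1, 6, 11, 21, 31, 41]
def ccLetters : List String := ["F", "A", "B", "C", "D", "E", "F"]

def cc_rank_alt (complexity : Int) : String :=
  ccLetters.getD (bisectRightGo ccThresholds complexity 0 ccThresholds.length) "F"

-- ===== PRECONDITION & SPEC =====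
def Spec_cc_rank (complexity : Int) (out : String) : Prop := out = cc_rank_alt complexity
instance (complexity : Int) (out : String) : Decidable (Spec_cc_rank complexity out) := by unfold Spec_cc_rank; infer_instance

-- ===== CLAIM (what is proved, stated in full; the proofs are below) =====
def Claim_equal_cc_rank : Prop := ∀ (complexity : Int), Dom_cc_rank complexity → Spec_cc_rank complexity (cc_rank complexity)

-- ===== LEMMAS AND PROOFS =====
theorem cc_rank_alt_eval (c : Int) :
    cc_rank_alt c =
      if c < 1 then "F" else if c < 6 then "A" else if c < 11 then "B"
      else if c < 21 then "C" else if c < 31 then "D" else if c < 41 then "E" else "F" := by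
  unfold cc_rank_alt ccThresholds ccLetters
  repeat (rw [bisectRightGo]; norm_num)
  split_ifs <;> simp_all <;> omega

theorem cc_rank_eval (c : Int) :
    cc_rank c =
      if c < 1 then "F" else if c < 6 then "A" else if c < 11 then "B"
      else if c < 21 then "C" else if c < 31 then "D" else if c < 41 then "E" else "F" := by
  unfold cc_rank
  simp only [ccRankLoop, Bool.and_eq_true, decide_eq_true_eq]
  split_ifs <;> first | rfl | omega

-- ===== VERDICT (by name: the statement is the Claim_ definition above) =====
theorem cc_rank_spec : Claim_equal_cc_rank := by
  intro c _
  unfold Spec_cc_rank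
  rw [cc_rank_eval, cc_rank_alt_eval]
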